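-- pv_equiv track=rewrite | github.com/Pharaon3/Art-Logic-Challenge | base.py | encode_custom
-- ===== SOURCE A (Python) =====
-- def encode_custom(input_data):
--    """
--    Custom encoding function that turns a string into a list of integers.
--
--    The input string is processed in blocks of four characters, which are encoded
--    using bitwise operations to pack the ASCII values into integers.
--
--    @param input_data: The string to encode.
--    @return: A list of integers representing the encoded data.
--    """
--    packed_chunks = []  # To hold the integer values of each character block
--    temp_chunk = 0  # Current chunk being formed
--    bit_position = 0  # Position of the current bit within the chunk
--
--    for char in input_data:
--       temp_chunk |= ord(char) << bit_position  # Pack ASCII value into the chunk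
--       bit_position += 8  # Move to the next byte position
--       if bit_position == 32:  # When the chunk is full
--          packed_chunks.append(temp_chunk)  # Save the chunk
--          temp_chunk = 0  # Reset chunk for the next group
--          bit_position = 0  # Reset bit position
--
--    # Process the remaining characters in the last chunk if any
--    if bit_position > 0:
--       packed_chunks.append(temp_chunk)
--
--    # Now encode the chunks into a list of integers using a custom mapping
--    encoded_output = []
--    for chunk in packed_chunks:
--       encoded_value = 0  # Will hold the encoded version of the chunk
--       bit_counter = 0  # Tracks the bit position
--       while chunk > 0:
--          encoded_value |= (chunk & 1) << ((bit_counter % 8) * 4 + (bit_counter // 8))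
--          chunk >>= 1
--          bit_counter += 1
--       encoded_output.append(encoded_value)
--
--    return encoded_output
-- ===== SOURCE B (Python) =====
-- # B: pack 4-char blocks by index, then permute bits byte-wise via a precomputed
-- # 256-entry table instead of A's per-bit loop.
-- SPREAD = []
-- for _b in range(256):
--     _v = 0
--     for _r in range(8):
--         _v |= ((_b >> _r) & 1) << (4 * _r)
--     SPREAD.append(_v)
--
-- def encode_custom(input_data):
--     chunks = []
--     for i in range(0, len(input_data), 4):
--         chunk = 0
--         for j, ch in enumerate(input_data[i:i + 4]):
--             chunk |= ord(ch) << (8 * j)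
--         chunks.append(chunk)
--     out = []
--     for chunk in chunks:
--         encoded = 0
--         g = 0
--         while chunk:
--             encoded |= SPREAD[chunk & 0xFF] << g
--             chunk >>= 8
--             g += 1
--         out.append(encoded)
--     return out
-- ===== Notes on version B (the rewrite author's own statement) =====
-- stated objective: faster
-- what changed: A permutes each chunk bit-by-bit (32 iterations of (chunk&1)<<((i%8)*4+i//8)); B packs the string in 4-char slices and permutes each chunk byte-by-byte with a precomputed 256-entry SPREAD table (4 lookups per chunk).
import Mathlib
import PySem

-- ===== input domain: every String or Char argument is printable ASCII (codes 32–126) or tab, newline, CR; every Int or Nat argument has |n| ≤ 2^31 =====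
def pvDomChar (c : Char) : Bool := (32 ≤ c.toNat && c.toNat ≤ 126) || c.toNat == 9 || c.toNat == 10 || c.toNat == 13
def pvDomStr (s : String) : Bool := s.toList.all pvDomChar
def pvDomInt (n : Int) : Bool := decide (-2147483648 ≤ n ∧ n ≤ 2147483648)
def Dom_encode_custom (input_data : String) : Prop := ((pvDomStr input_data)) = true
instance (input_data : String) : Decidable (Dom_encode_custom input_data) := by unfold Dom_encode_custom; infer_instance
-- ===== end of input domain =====

-- B replaces A's 32-iteration per-bit permutation loop by a byte-wise loop over a
-- precomputed 256-entry spread table (objective: faster by a constant factor).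
-- All intermediate Python ints here are nonnegative (ORs of left-shifted character
-- codes), so both ports track them as Nat and cast to Int in the output list; on
-- these values Nat's &&&, |||, <<<, >>> are exactly Python's operators.

-- ===== PORT A =====
-- state: (packed_chunks, temp_chunk, bit_position)
def pvStepA (s : List Nat × Nat × Nat) (c : Char) : List Nat × Nat × Nat :=
  let temp := s.2.1 ||| (c.toNat <<< s.2.2)
  let bp := s.2.2 + 8
  if bp == 32 then (s.1 ++ [temp], 0, 0) else (s.1, temp, bp)

-- A's inner while-loop: `while chunk > 0: encoded |= (chunk & 1) << ((bc % 8) * 4 + bc // 8); …`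
def pvEncLoopA (enc chunk bc : Nat) : Nat :=
  if 0 < chunk then
    pvEncLoopA (enc ||| ((chunk &&& 1) <<< ((bc % 8) * 4 + bc / 8))) (chunk >>> 1) (bc + 1)
  else enc
termination_by chunk
decreasing_by simp [Nat.shiftRight_eq_div_pow]; omega

def encode_custom (input_data : String) : List Int :=
  let s := input_data.toList.foldl pvStepA ([], 0, 0)
  let packed := if 0 < s.2.2 then s.1 ++ [s.2.1] else s.1
  packed.map (fun chunk => (pvEncLoopA 0 chunk 0 : Int))

-- ===== PORT B =====
-- SPREAD[b]: bit r of byte b placed at position 4*r (built by Source B's table loop)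
def pvSpread (b : Nat) : Nat :=
  (List.range 8).foldl (fun v r => v ||| (((b >>> r) &&& 1) <<< (4 * r))) 0

def pvSPREAD : List Nat := (List.range 256).map pvSpread

-- chunk |= ord(ch) << (8 * j) over enumerate(block)
def pvChunkB (block : List Char) : Nat :=
  block.zipIdx.foldl (fun chunk jc => chunk ||| (jc.1.toNat <<< (8 * jc.2))) 0

-- for i in range(0, len(input_data), 4): chunk of the slice input_data[i:i+4]
def pvPackB (l : List Char) : List Nat :=
  (PySem.List.pyRange 0 (l.length : Int) 4).map
    (fun i => pvChunkB (PySem.List.slice l (some i) (some (i + 4))))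

-- B's inner loop: `while chunk: encoded |= SPREAD[chunk & 0xFF] << g; chunk >>= 8; g += 1`
-- the index chunk & 0xFF is always in [0, 256), so Python's SPREAD[...] never raises
-- and equals List.getD with any default.
def pvEncLoopB (enc chunk g : Nat) : Nat :=
  if chunk ≠ 0 then
    pvEncLoopB (enc ||| (pvSPREAD.getD (chunk &&& 255) 0 <<< g)) (chunk >>> 8) (g + 1)
  else enc
termination_by chunk
decreasing_by simp [Nat.shiftRight_eq_div_pow]; omega

def encode_custom_alt (input_data : String) : List Int :=
  (pvPackB input_data.toList).map (fun chunk => (pvEncLoopB 0 chunk 0 : Int))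

-- ===== PRECONDITION & SPEC =====
def Spec_encode_custom (input_data : String) (out : List Int) : Prop := out = encode_custom_alt input_data
instance (input_data : String) (out : List Int) : Decidable (Spec_encode_custom input_data out) := by unfold Spec_encode_custom; infer_instance

-- ===== CLAIM (what is proved, stated in full; the proofs are below) =====
def Claim_equal_encode_custom : Prop := ∀ (input_data : String), Dom_encode_custom input_data → Spec_encode_custom input_data (encode_custom input_data)

-- ===== LEMMAS AND PROOFS =====

-- accumulator-free versions of the two inner loops
def pvA0 (chunk bc : Nat) : Nat :=
  if 0 < chunk then
    ((chunk &&& 1) <<< ((bc % 8) * 4 + bc / 8)) ||| pvA0 (chunk >>> 1) (bc + 1)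
  else 0
termination_by chunk
decreasing_by simp [Nat.shiftRight_eq_div_pow]; omega

def pvB0 (chunk g : Nat) : Nat :=
  if chunk ≠ 0 then
    (pvSPREAD.getD (chunk &&& 255) 0 <<< g) ||| pvB0 (chunk >>> 8) (g + 1)
  else 0
termination_by chunk
decreasing_by simp [Nat.shiftRight_eq_div_pow]; omega

lemma pvA0_zero (bc : Nat) : pvA0 0 bc = 0 := by
  rw [pvA0]; simp

lemma pvA0_step (n bc : Nat) :
    pvA0 n bc = ((n &&& 1) <<< ((bc % 8) * 4 + bc / 8)) ||| pvA0 (n >>> 1) (bc + 1) := by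
  rw [pvA0]
  rcases Nat.eq_zero_or_pos n with h | h
  · subst h; simp [pvA0_zero]
  · simp [h]

lemma pvEncLoopA_acc (n : Nat) : ∀ enc bc, pvEncLoopA enc n bc = enc ||| pvA0 n bc := by
  induction n using Nat.strong_induction_on with
  | _ n ih =>
    intro enc bc
    rw [pvEncLoopA, pvA0]
    rcases Nat.eq_zero_or_pos n with h | h
    · subst h; simp
    · have hlt : n >>> 1 < n := by simp [Nat.shiftRight_eq_div_pow]; omega
      simp only [h, if_pos]
      rw [ih _ hlt]
      rw [Nat.or_assoc]

lemma pvEncLoopB_acc (n : Nat) : ∀ enc g, pvEncLoopB enc n g = enc ||| pvB0 n g := by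
  induction n using Nat.strong_induction_on with
  | _ n ih =>
    intro enc g
    rw [pvEncLoopB, pvB0]
    by_cases h : n = 0
    · subst h; simp
    · have hlt : n >>> 8 < n := by simp [Nat.shiftRight_eq_div_pow]; omega
      simp only [h, ne_eq, not_false_iff, if_pos]
      rw [ih _ hlt, Nat.or_assoc]

lemma pvSPREAD_getD (m : Nat) (h : m < 256) : pvSPREAD.getD m 0 = pvSpread m := by
  simp [pvSPREAD, List.getD_eq_getElem?_getD, h]

lemma pvAnd255 (n : Nat) : n &&& 255 = n % 256 := by
  have := Nat.and_two_pow_sub_one_eq_mod n 8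
  norm_num at this; omega

-- one byte of A's bit loop equals one table step
set_option maxHeartbeats 2000000 in
lemma pvByteStep (n g : Nat) :
    pvA0 n (8 * g) = (pvSpread (n &&& 255) <<< g) ||| pvA0 (n >>> 8) (8 * g + 8) := by
  rw [pvA0_step, pvA0_step, pvA0_step, pvA0_step, pvA0_step, pvA0_step, pvA0_step, pvA0_step]
  simp only [pvSpread, List.range_succ, List.range_zero, List.foldl_append, List.foldl_cons,
    List.foldl_nil, List.nil_append, Nat.zero_or, Nat.shiftLeft_or_distrib, ← Nat.shiftLeft_add,
    Nat.or_assoc]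
  simp only [Nat.shiftRight_eq_div_pow, Nat.and_one_is_mod, pvAnd255, Nat.shiftLeft_eq]
  refine congrArg₂ (· ||| ·) ?_ (congrArg₂ (· ||| ·) ?_ (congrArg₂ (· ||| ·) ?_ (congrArg₂ (· ||| ·) ?_ (congrArg₂ (· ||| ·) ?_ (congrArg₂ (· ||| ·) ?_ (congrArg₂ (· ||| ·) ?_ (congrArg₂ (· ||| ·) ?_ ?_)))))))
  all_goals first
    | omega
    | (congr 1 <;> first | omega | (congr 1; omega))

lemma pvA0_eq_pvB0 (n : Nat) : ∀ g, pvA0 n (8 * g) = pvB0 n g := by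
  induction n using Nat.strong_induction_on with
  | _ n ih =>
    intro g
    rw [pvB0]
    by_cases h : n = 0
    · subst h; simp [pvA0_zero]
    · have hlt : n >>> 8 < n := by simp [Nat.shiftRight_eq_div_pow]; omega
      simp only [h, ne_eq, not_false_iff, if_pos]
      rw [pvSPREAD_getD _ (by rw [pvAnd255]; omega), ← ih _ hlt (g + 1)]
      have : 8 * (g + 1) = 8 * g + 8 := by ring
      rw [this, ← pvByteStep]

-- proof-side take/drop-4 characterization of B's index-stepped packing loop
def pvPackTD (l : List Char) : List Nat :=
  if l.isEmpty then [] else pvChunkB (l.take 4) :: pvPackTD (l.drop 4)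
termination_by l.length
decreasing_by cases l <;> simp_all

lemma pvRange4_cons (a b : Int) (h : a < b) :
    PySem.List.pyRange a b 4 = a :: PySem.List.pyRange (a + 4) b 4 := by
  rw [PySem.List.pyRange_of_pos a b (by norm_num), PySem.List.pyRange_of_pos (a + 4) b (by norm_num)]
  have hm : (if a < b then ((b - a + 4 - 1) / 4).toNat else 0) =
      (if a + 4 < b then ((b - (a + 4) + 4 - 1) / 4).toNat else 0) + 1 := by
    split_ifs <;> omega
  rw [hm, List.range_succ_eq_map]
  simp only [List.map_cons, List.map_map]
  congr 1
  · norm_num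
  · refine List.map_congr_left (fun k _ => ?_)
    simp only [Function.comp_apply]
    push_cast; ring

lemma pvPackB_eq_TD (l : List Char) : pvPackB l = pvPackTD l := by
  induction l using pvPackTD.induct with
  | case1 l hl =>
    rw [List.isEmpty_iff] at hl; subst hl
    rw [pvPackTD]; simp [pvPackB, PySem.List.pyRange_of_pos]
  | case2 l hl ih =>
    rw [pvPackTD, if_neg (by simp [hl])]
    have hlen : (0 : Int) < l.length := by
      rcases l with _ | ⟨x, t⟩
      · simp at hl
      · simp
    unfold pvPackB
    rw [pvRange4_cons 0 l.length hlen, List.map_cons]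
    congr 1
    · congr 1
      rw [PySem.List.slice_zero_start]
      norm_num
      exact_mod_cast PySem.List.slice_to_natCast l 4
    · rw [← ih]
      unfold pvPackB
      rw [PySem.List.pyRange_of_pos (0 + 4) _ (by norm_num),
          PySem.List.pyRange_of_pos 0 _ (by norm_num)]
      have hc : (if (0 : Int) + 4 < l.length then (((l.length : Int) - (0 + 4) + 4 - 1) / 4).toNat else 0) =
          (if (0 : Int) < (l.drop 4).length then ((((l.drop 4).length : Int) - 0 + 4 - 1) / 4).toNat else 0) := by
        simp only [List.length_drop]
        split_ifs <;> omega
      rw [List.map_map, List.map_map, hc]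
      refine List.map_congr_left (fun k _ => ?_)
      simp only [Function.comp]
      congr 1
      have h1 : (0 : Int) + 4 + 4 * (k : Int) = ((4 + 4 * k : Nat) : Int) := by push_cast; ring
      have h3 : (0 : Int) + 4 * (k : Int) = ((4 * k : Nat) : Int) := by push_cast; ring
      rw [h1, h3]
      have h2 : ((4 + 4 * k : Nat) : Int) + 4 = ((4 + 4 * k + 4 : Nat) : Int) := by push_cast; ring
      have h4 : ((4 * k : Nat) : Int) + 4 = ((4 * k + 4 : Nat) : Int) := by push_cast; ring
      rw [h2, h4, PySem.List.slice_natCast, PySem.List.slice_natCast, List.drop_drop]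
      have e1 : 4 + 4 * k + 4 - (4 + 4 * k) = 4 := by omega
      have e2 : 4 * k + 4 - 4 * k = 4 := by omega
      rw [e1, e2]

-- packing: A's running fold equals B's 4-block packing (via pvPackTD)
lemma pvPack_eq (l : List Char) : ∀ acc : List Nat,
    (if 0 < (l.foldl pvStepA (acc, 0, 0)).2.2
     then (l.foldl pvStepA (acc, 0, 0)).1 ++ [(l.foldl pvStepA (acc, 0, 0)).2.1]
     else (l.foldl pvStepA (acc, 0, 0)).1) = acc ++ pvPackTD l := by
  induction l using pvPackTD.induct with
  | case1 l hl =>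
    rw [List.isEmpty_iff] at hl; subst hl
    intro acc; simp [pvPackTD]
  | case2 l hl ih =>
    intro acc
    rcases l with _ | ⟨a, _ | ⟨b, _ | ⟨c, _ | ⟨d, t⟩⟩⟩⟩
    · simp at hl
    · rw [pvPackTD]; simp [pvStepA, pvChunkB, List.zipIdx, pvPackTD]
    · rw [pvPackTD]; simp [pvStepA, pvChunkB, List.zipIdx, pvPackTD]
    · rw [pvPackTD]; simp [pvStepA, pvChunkB, List.zipIdx, pvPackTD]
    · rw [pvPackTD]
      simp only [List.foldl_cons, pvStepA]
      norm_num
      simp only [List.drop_succ_cons, List.drop_zero] at ih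
      rw [ih]
      simp [pvChunkB, List.zipIdx]
lemma pvChunk_eq_pvB (c : Nat) : pvEncLoopA 0 c 0 = pvEncLoopB 0 c 0 := by
  rw [pvEncLoopA_acc, pvEncLoopB_acc, Nat.zero_or, Nat.zero_or]
  have := pvA0_eq_pvB0 c 0
  simpa using this

theorem encode_custom_spec : Claim_equal_encode_custom := by
  intro input _
  simp only [Spec_encode_custom, encode_custom, encode_custom_alt]
  rw [pvPackB_eq_TD, pvPack_eq input.toList []]
  simp only [List.nil_append]
  exact List.map_congr_left (fun c _ => by rw [pvChunk_eq_pvB c])
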